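-- pv_equiv track=rewrite | github.com/larsks/py-st7565 | st7565/bitops.py | rotater
-- ===== SOURCE A (Python) =====
-- def rotater(row, steps=1):
--     '''Rotate an array of integers one bit to the right.'''
--     lost = 0
--     mask = (0xff << steps & 0xff) ^ 0xff
--     for i, b in enumerate(row[:]):
--         x = b >> steps
--         if lost:
--             x |= (lost << (8-steps)) & 0xff
--         lost = b & mask
--         row[i] = x
--
--     if lost:
--         row[0] |= (lost << (8-steps))
--
--     return row
-- ===== SOURCE B (Python) =====
-- def rotater(row, steps=1):
--     '''Rotate an array of integers one bit to the right.'''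
--     mask = (0xff << steps & 0xff) ^ 0xff
--     shift = 8 - steps
--     if not row:
--         return row
--     out = [(row[0] >> steps) | ((row[-1] & mask) << shift)]
--     out += [(b >> steps) | (((p & mask) << shift) & 0xff)
--             for p, b in zip(row, row[1:])]
--     row[:] = out
--     return row
-- ===== Notes on version B (the rewrite author's own statement) =====
-- stated objective: simpler
-- what changed: Replaces A's stateful carry-threading loop (a `lost` accumulator updated and tested each iteration, plus a post-loop wraparound fix-up of row[0]) with a stateless construction: each output byte is computed directly from its own element and its cyclic predecessor via zip, then assigned back in one slice.
-- outside the precondition, e.g. on rotater([256], 9): A returns [0], B raises ValueError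
import Mathlib
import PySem

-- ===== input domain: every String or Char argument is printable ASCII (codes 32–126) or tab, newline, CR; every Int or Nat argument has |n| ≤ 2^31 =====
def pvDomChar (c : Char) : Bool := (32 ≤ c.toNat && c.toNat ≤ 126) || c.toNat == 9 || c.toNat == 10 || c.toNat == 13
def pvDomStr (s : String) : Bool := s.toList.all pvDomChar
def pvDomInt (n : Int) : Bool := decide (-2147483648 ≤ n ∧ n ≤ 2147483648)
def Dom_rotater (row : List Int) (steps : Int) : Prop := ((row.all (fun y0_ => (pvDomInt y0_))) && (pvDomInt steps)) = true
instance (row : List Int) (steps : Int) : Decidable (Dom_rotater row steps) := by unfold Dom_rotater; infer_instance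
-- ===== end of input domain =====

-- B replaces A's stateful carry loop by a stateless zip over cyclic neighbour pairs (objective: simpler).
-- Equivalence is about the RETURN value only; both Pythons also mutate `row` in place to the same contents.

-- ===== PORT A =====
-- literal transliteration: fold over enumerate(row) threading (lost, row), then the wraparound fix-up
def rotater (row : List Int) (steps : Int) : List Int :=
  let s := steps.toNat
  let mask : Int := PySem.Int.bxor (PySem.Int.band (0xff <<< s) 0xff) 0xff
  let st := (PySem.List.enumerate row).foldl
    (fun (st : Int × List Int) (p : Int × Int) =>
      let lost := st.1
      let r := st.2
      let x := p.2 >>> s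
      let x := if lost ≠ 0 then PySem.Int.bor x (PySem.Int.band (lost <<< (8 - s)) 0xff) else x
      (PySem.Int.band p.2 mask, r.set p.1.toNat x))
    (0, row)
  if st.1 ≠ 0 then
    match st.2 with
    | [] => []
    | h :: t => PySem.Int.bor h (st.1 <<< (8 - s)) :: t
  else st.2

-- ===== PORT B =====
-- literal transliteration of Source B: head from row[0] and row[-1], tail mapped over zip(row, row[1:])
def rotater_alt (row : List Int) (steps : Int) : List Int :=
  let s := steps.toNat
  let mask : Int := PySem.Int.bxor (PySem.Int.band (0xff <<< s) 0xff) 0xff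
  let shift := 8 - s
  match row with
  | [] => []
  | b0 :: rest =>
    (PySem.Int.bor (b0 >>> s) ((PySem.Int.band ((b0 :: rest).getLast (by simp)) mask) <<< shift)) ::
      (List.zip (b0 :: rest) rest).map
        (fun (pb : Int × Int) => PySem.Int.bor (pb.2 >>> s) (PySem.Int.band ((PySem.Int.band pb.1 mask) <<< shift) 0xff))

-- ===== PRECONDITION & SPEC =====
-- Pre_ excludes negative steps (A raises ValueError at the mask shift) and steps > 8 on a nonempty row,
-- where A raises ValueError unless every element's low 8 bits are zero (then A returns the plain shifts
-- while B's unconditional wraparound shift by 8-steps raises ValueError).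
def Pre_rotater (row : List Int) (steps : Int) : Prop :=
  0 ≤ steps ∧ (steps ≤ 8 ∨ row = [])
instance (row : List Int) (steps : Int) : Decidable (Pre_rotater row steps) := by
  unfold Pre_rotater; infer_instance
def pvWitness_rotater : List Int × Int := ([0x81, 0x01], 1)

def Spec_rotater (row : List Int) (steps : Int) (out : List Int) : Prop := out = rotater_alt row steps
instance (row : List Int) (steps : Int) (out : List Int) : Decidable (Spec_rotater row steps out) := by unfold Spec_rotater; infer_instance

-- ===== CLAIM (what is proved, stated in full; the proofs are below) =====
def Claim_equal_rotater : Prop := ∀ (row : List Int) (steps : Int), Dom_rotater row steps → Pre_rotater row steps → Spec_rotater row steps (rotater row steps)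

-- ===== LEMMAS AND PROOFS =====

-- proof-side model of A's loop body: output element from previous carry `lost` and current byte b
def pvElem (s : Nat) (lost b : Int) : Int :=
  PySem.Int.bor (b >>> s) (PySem.Int.band (lost <<< (8 - s)) 0xff)

-- proof-side recursion computing A's loop outputs for a suffix, given the incoming carry
def pvMap (s : Nat) (mask : Int) (lost : Int) : List Int → List Int
  | [] => []
  | b :: t => pvElem s lost b :: pvMap s mask (PySem.Int.band b mask) t

def pvLost (mask : Int) (lost : Int) : List Int → Int
  | [] => lost
  | b :: t => pvLost mask (PySem.Int.band b mask) t

theorem elem_zero (s : Nat) (b : Int) : pvElem s 0 b = b >>> s := by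
  simp [pvElem, PySem.Int.band]

-- the branch `if lost: x |= …` equals the unconditional OR
theorem body_eq (s : Nat) (lost b : Int) :
    (if lost ≠ 0 then PySem.Int.bor (b >>> s) (PySem.Int.band (lost <<< (8 - s)) 0xff) else b >>> s)
      = pvElem s lost b := by
  by_cases h : lost = 0
  · subst h; simp [elem_zero]
  · simp [pvElem, h]

-- A's foldl, started after an already-processed prefix `acc`, produces acc ++ pvMap … and carry pvLost …
theorem foldl_char (s : Nat) (mask : Int) :
    ∀ (l acc : List Int) (lost : Int),
      (PySem.List.enumerate l (acc.length : Int)).foldl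
        (fun (st : Int × List Int) (p : Int × Int) =>
          let lost := st.1
          let r := st.2
          let x := p.2 >>> s
          let x := if lost ≠ 0 then PySem.Int.bor x (PySem.Int.band (lost <<< (8 - s)) 0xff) else x
          (PySem.Int.band p.2 mask, r.set p.1.toNat x))
        (lost, acc ++ l)
      = (pvLost mask lost l, acc ++ pvMap s mask lost l) := by
  intro l
  induction l with
  | nil => intro acc lost; simp [PySem.List.enumerate, pvMap, pvLost]
  | cons b t ih =>
    intro acc lost
    rw [PySem.List.enumerate_cons, List.foldl_cons]
    simp only
    have hset : (acc ++ b :: t).set (Int.toNat (acc.length : Int)) (pvElem s lost b)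
        = (acc ++ [pvElem s lost b]) ++ t := by
      simp [List.append_assoc]
    rw [body_eq]
    have hlen : ((acc.length : Int) + 1) = (((acc ++ [pvElem s lost b]).length : Int)) := by
      simp
    rw [hset, hlen, ih]
    simp [pvMap, pvLost, List.append_assoc]

-- pvMap with the carry of a known previous byte is B's zip-map
theorem pvMap_zip (s : Nat) (mask : Int) :
    ∀ (t : List Int) (b : Int),
      pvMap s mask (PySem.Int.band b mask) t
        = (List.zip (b :: t) t).map
            (fun (pb : Int × Int) => PySem.Int.bor (pb.2 >>> s)
              (PySem.Int.band ((PySem.Int.band pb.1 mask) <<< (8 - s)) 0xff)) := by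
  intro t
  induction t with
  | nil => intro b; simp [pvMap]
  | cons b' t' ih =>
    intro b
    simp [pvMap, pvElem, List.zip, ih b']

theorem pvLost_last (mask : Int) :
    ∀ (t : List Int) (b lost : Int),
      pvLost mask lost (b :: t) = PySem.Int.band ((b :: t).getLast (by simp)) mask := by
  intro t
  induction t with
  | nil => intro b lost; simp [pvLost]
  | cons b' t' ih =>
    intro b lost
    rw [show pvLost mask lost (b :: b' :: t') = pvLost mask (PySem.Int.band b mask) (b' :: t') from rfl,
        ih]
    simp

-- ===== VERDICT (by name: the statement is the Claim_ definition above) =====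
theorem rotater_spec : Claim_equal_rotater := by
  intro row steps _hdom hpre
  unfold Spec_rotater rotater rotater_alt
  cases row with
  | nil =>
    simp only
    have := foldl_char steps.toNat
      (PySem.Int.bxor (PySem.Int.band (0xff <<< steps.toNat) 0xff) 0xff) [] [] 0
    simp only [List.length_nil, Int.natCast_zero, List.nil_append] at this
    rw [this]
    simp [pvLost, pvMap]
  | cons b0 rest =>
    simp only
    have := foldl_char steps.toNat
      (PySem.Int.bxor (PySem.Int.band (0xff <<< steps.toNat) 0xff) 0xff) (b0 :: rest) [] 0
    simp only [List.length_nil, Int.natCast_zero, List.nil_append] at this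
    rw [this]
    rw [pvLost_last _ rest b0 0]
    set mask := PySem.Int.bxor (PySem.Int.band (0xff <<< steps.toNat) 0xff) 0xff with hmask
    set c := PySem.Int.band ((b0 :: rest).getLast (by simp)) mask with hc
    have hmap : pvMap steps.toNat mask 0 (b0 :: rest)
        = (b0 >>> steps.toNat) ::
          (List.zip (b0 :: rest) rest).map
            (fun (pb : Int × Int) => PySem.Int.bor (pb.2 >>> steps.toNat)
              (PySem.Int.band ((PySem.Int.band pb.1 mask) <<< (8 - steps.toNat)) 0xff)) := by
      rw [show pvMap steps.toNat mask 0 (b0 :: rest)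
            = pvElem steps.toNat 0 b0 :: pvMap steps.toNat mask (PySem.Int.band b0 mask) rest from rfl,
          elem_zero, pvMap_zip]
    rw [hmap]
    by_cases h : c = 0
    · simp [h]
    · simp [h]
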